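-- pv_equiv track=rewrite | github.com/10zinten/Web-Scraping | Imdb/Imdb/pipelines.py | clean_money
-- ===== SOURCE A (Python) =====
-- def clean_money(string):
-- 	currency_symbols = "$"
-- 	clean_money_string = ""
-- 	stop_adding = False
-- 	for index, char in enumerate(list(string)):
-- 		if char in currency_symbols and not stop_adding:
-- 			clean_money_string += char
-- 		elif char is "," and not stop_adding:
-- 			clean_money_string += char
-- 		elif char.isdigit() and not stop_adding:
-- 			clean_money_string += char
-- 		elif char is ' ':
-- 			if len(clean_money_string) > 0:
-- 				stop_adding = True
--
-- 	return clean_money_string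
-- ===== SOURCE B (Python) =====
-- def clean_money(string):
--     # Find the cut index: first space that comes after an allowed char ($, comma, digit).
--     cut = len(string)
--     seen = False
--     for i, c in enumerate(string):
--         if c == ' ':
--             if seen:
--                 cut = i
--                 break
--         elif c == '$' or c == ',' or c.isdigit():
--             seen = True
--     # Then filter the prefix.
--     return ''.join(c for c in string[:cut] if c.isdigit() or c in "$,")
-- ===== Notes on version B (the rewrite author's own statement) =====
-- stated objective: alternative
-- what changed: B separates boundary-finding (index of the first space after any $/comma/digit) from filtering, replacing A's single stateful accumulate-with-stop-flag loop by a cut-index scan followed by a filter over the prefix.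
import Mathlib
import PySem

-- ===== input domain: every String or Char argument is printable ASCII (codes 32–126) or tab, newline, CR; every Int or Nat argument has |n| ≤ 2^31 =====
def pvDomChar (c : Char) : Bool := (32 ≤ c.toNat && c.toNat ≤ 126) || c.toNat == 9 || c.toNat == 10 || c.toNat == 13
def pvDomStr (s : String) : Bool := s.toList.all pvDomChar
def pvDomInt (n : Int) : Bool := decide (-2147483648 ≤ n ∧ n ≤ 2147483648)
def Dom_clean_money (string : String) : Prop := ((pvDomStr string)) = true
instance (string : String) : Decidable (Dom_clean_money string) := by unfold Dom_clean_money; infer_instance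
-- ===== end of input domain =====

-- B separates finding the cut index (first space after any $/comma/digit) from filtering the prefix;
-- objective: alternative decomposition, same cost.
-- ===== PORT A =====
-- A's loop: accumulate $/comma/digit while not stop_adding; a space sets stop_adding once the accumulator is nonempty.
def cleanMoneyLoopA : List Char → List Char → Bool → List Char
  | [], acc, _ => acc
  | c :: rest, acc, stop =>
    if c = '$' ∧ ¬stop then cleanMoneyLoopA rest (acc ++ [c]) stop
    else if c = ',' ∧ ¬stop then cleanMoneyLoopA rest (acc ++ [c]) stop
    else if c.isDigit ∧ ¬stop then cleanMoneyLoopA rest (acc ++ [c]) stop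
    else if c = ' ' then
      (if acc.length > 0 then cleanMoneyLoopA rest acc true else cleanMoneyLoopA rest acc stop)
    else cleanMoneyLoopA rest acc stop

def clean_money (string : String) : String :=
  String.ofList (cleanMoneyLoopA string.toList [] false)

-- ===== PORT B =====
-- cut-index scan: 0 at the first space after an allowed char was seen, else walk on.
def cleanMoneyCut : List Char → Bool → Nat
  | [], _ => 0
  | c :: rest, seen =>
    if c = ' ' ∧ seen then 0
    else if c = '$' ∨ c = ',' ∨ c.isDigit then 1 + cleanMoneyCut rest true
    else 1 + cleanMoneyCut rest seen

def clean_money_alt (string : String) : String :=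
  String.ofList (((string.toList.take (cleanMoneyCut string.toList false)).filter
    (fun c => c.isDigit ∨ c = '$' ∨ c = ',')))

-- ===== PRECONDITION & SPEC =====
def Spec_clean_money (string : String) (out : String) : Prop := out = clean_money_alt string
instance (string : String) (out : String) : Decidable (Spec_clean_money string out) := by unfold Spec_clean_money; infer_instance

-- ===== CLAIM (what is proved, stated in full; the proofs are below) =====
def Claim_equal_clean_money : Prop := ∀ (string : String), Dom_clean_money string → Spec_clean_money string (clean_money string)

-- ===== LEMMAS AND PROOFS =====

-- ===== VERDICT (by name: the statement is the Claim_ definition above) =====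
-- A with stop_adding = true never adds anything more.
theorem loopA_stopped (l acc) : cleanMoneyLoopA l acc true = acc := by
  induction l generalizing acc with
  | nil => rfl
  | cons c rest ih =>
    simp only [cleanMoneyLoopA]
    split_ifs <;> simp_all

-- Loop invariant: with stop = false, A returns acc plus the allowed chars of the prefix up to B's cut,
-- where B's "seen" flag corresponds to acc being nonempty.
theorem loopA_eq (l : List Char) (acc : List Char) :
    cleanMoneyLoopA l acc false =
      acc ++ (l.take (cleanMoneyCut l (decide (acc ≠ [])))).filter
        (fun c => c.isDigit ∨ c = '$' ∨ c = ',') := by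
  induction l generalizing acc with
  | nil => simp [cleanMoneyLoopA, cleanMoneyCut]
  | cons c rest ih =>
    by_cases hall : c = '$' ∨ c = ',' ∨ c.isDigit
    · have hns : ¬ (c = ' ') := by
        rcases hall with h | h | h
        · subst h; decide
        · subst h; decide
        · intro hc
          subst hc
          revert h
          decide
      have hadd : cleanMoneyLoopA (c :: rest) acc false =
          cleanMoneyLoopA rest (acc ++ [c]) false := by
        simp only [cleanMoneyLoopA]
        rcases hall with h | h | h <;> split_ifs <;> simp_all
      rw [hadd, ih]
      have hcut : cleanMoneyCut (c :: rest) (decide (acc ≠ [])) =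
          1 + cleanMoneyCut rest true := by
        simp only [cleanMoneyCut]
        split_ifs <;> simp_all
      rw [hcut]
      have hne : (acc ++ [c]) ≠ [] := by simp
      simp only [hne, ne_eq]
      rw [Nat.add_comm, List.take_succ_cons, List.filter_cons]
      have hkeep : decide (c.isDigit = true ∨ c = '$' ∨ c = ',') = true := by
        rcases hall with h | h | h <;> simp [h]
      rw [hkeep]
      simp
    · -- c not allowed
      push Not at hall
      obtain ⟨h1, h2, h3⟩ := hall
      by_cases hsp : c = ' '
      · subst hsp
        by_cases hne : acc ≠ []
        · -- space after content: everything stops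
          have : cleanMoneyLoopA (' ' :: rest) acc false = acc := by
            simp only [cleanMoneyLoopA]
            split_ifs <;> simp_all [loopA_stopped, List.length_pos_iff]
          have hcut : cleanMoneyCut (' ' :: rest) (decide (acc ≠ [])) = 0 := by
            simp [cleanMoneyCut, hne]
          rw [this, hcut]
          simp
        · push Not at hne
          subst hne
          have hstep : cleanMoneyLoopA (' ' :: rest) [] false =
              cleanMoneyLoopA rest [] false := by
            simp only [cleanMoneyLoopA]
            split_ifs <;> simp_all
          rw [hstep, ih]
          have hcut : cleanMoneyCut (' ' :: rest) (decide (([] : List Char) ≠ [])) =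
              1 + cleanMoneyCut rest false := by
            simp [cleanMoneyCut, Char.isDigit]
          rw [hcut, Nat.add_comm, List.take_succ_cons, List.filter_cons]
          simp [Char.isDigit]
      · -- skipped char
        have hskip : cleanMoneyLoopA (c :: rest) acc false =
            cleanMoneyLoopA rest acc false := by
          simp only [cleanMoneyLoopA]
          split_ifs <;> simp_all
        rw [hskip, ih]
        have hcut : cleanMoneyCut (c :: rest) (decide (acc ≠ [])) =
            1 + cleanMoneyCut rest (decide (acc ≠ [])) := by
          simp only [cleanMoneyCut]
          split_ifs <;> simp_all
        rw [hcut, Nat.add_comm, List.take_succ_cons, List.filter_cons]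
        simp [h1, h2, h3]

-- ===== VERDICT =====
theorem clean_money_spec : Claim_equal_clean_money := by
  intro s _
  unfold Spec_clean_money clean_money clean_money_alt
  rw [loopA_eq]
  simp
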